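-- pv_equiv track=rewrite | github.com/dansanderson/mega65-symbols | make-m65-symbols.py | bitrange_to_mask
-- ===== SOURCE A (Python) =====
-- def bitrange_to_mask(v):
--     """Parse a bitrange in an address to a mask.
--
--     Args:
--         v: The address field with optional bitmask.
--
--     Returns:
--         (addr, mask), where addr is a string (typically a hex value
--             starting with $) and mask is an integer mask of the
--             bitrange or None if no bitrange is in the address field.
--     """
--     if '.' not in v:
--         return (v, None)
--     addr, bitrange_str = v.split('.')
--     if '-' in bitrange_str:
--         (start, end) = bitrange_str.split('-')
--     else:
--         start = bitrange_str
--         end = bitrange_str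
--     start = int(start)
--     end = int(end)
--     assert(end < 8)
--     if start > end:
--         start, end = end, start
--     mask_val = 0
--     for i in range(8):
--         if i >= start and i <= end:
--             mask_val += 1 << i
--     return (addr, mask_val)
-- ===== SOURCE B (Python) =====
-- def bitrange_to_mask(v):
--     """Parse a bitrange in an address to a mask.
--
--     Index-based rewrite: instead of split()/tuple-unpacking, locate the
--     first '.' and '-' with find() and slice the pieces out; the mask of
--     the contiguous bit range is then computed in closed form as the
--     difference of two powers of two (the mask is 8-bit, so the top of
--     the range is clamped to bit 7) instead of testing each of the 8 bit
--     positions in a loop.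
--     """
--     dot = v.find('.')
--     if dot == -1:
--         return (v, None)
--     addr = v[:dot]
--     bits = v[dot + 1:]
--     dash = bits.find('-')
--     if dash == -1:
--         start = end = int(bits)
--     else:
--         start = int(bits[:dash])
--         end = int(bits[dash + 1:])
--     assert end < 8
--     lo = min(start, end)
--     hi = min(max(start, end), 7)
--     return (addr, (1 << (hi + 1)) - (1 << lo))
-- ===== Notes on version B (the rewrite author's own statement) =====
-- stated objective: simpler
-- what changed: Parsing is redone with find() and slicing instead of split()/tuple-unpacking, and the 8-iteration bit-testing loop is replaced by the closed-form mask (1 << (hi+1)) - (1 << lo) with lo/hi from min/max (hi clamped to bit 7).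
import Mathlib
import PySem

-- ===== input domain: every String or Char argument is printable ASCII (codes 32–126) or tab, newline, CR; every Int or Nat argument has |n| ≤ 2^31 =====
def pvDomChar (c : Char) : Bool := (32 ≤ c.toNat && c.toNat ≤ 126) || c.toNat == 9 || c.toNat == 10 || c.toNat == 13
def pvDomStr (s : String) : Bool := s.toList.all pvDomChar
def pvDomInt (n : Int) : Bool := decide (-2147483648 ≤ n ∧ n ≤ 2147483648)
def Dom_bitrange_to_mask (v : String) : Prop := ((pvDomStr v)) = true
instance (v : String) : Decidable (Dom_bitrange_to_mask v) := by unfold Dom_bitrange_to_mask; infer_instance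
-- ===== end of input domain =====

-- B replaces A's split()/tuple-unpack parsing by find()+slicing and A's 8-iteration
-- mask-building loop by the closed-form difference of two powers of two (objective: simpler).

-- ===== PORT A =====
-- A-side destructuring helpers (tuple unpacking 'x, y = ...'; none = the ValueError of a
-- wrong-sized unpack / a failed int())
def pvSplit2? (o : Option (List String)) : Option (String × String) :=
  match o with
  | some [a, b] => some (a, b)
  | _ => none

def pvIntPair? (p : String × String) : Option (Int × Int) :=
  match PySem.Int.ofStr? p.1, PySem.Int.ofStr? p.2 with
  | some a, some b => some (a, b)
  | _, _ => none

def bitrange_to_mask (v : String) : String × Option Int :=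
  if ¬ PySem.Str.isIn "." v then (v, none)
  else
    (pvSplit2? (PySem.Str.split? v ".")).elim (v, none) (fun ab =>
      -- ab = (addr, bitrange_str); '-' handling gives the (start, end) strings
      (pvSplit2? (if PySem.Str.isIn "-" ab.2 then PySem.Str.split? ab.2 "-"
                  else some [ab.2, ab.2])).elim (v, none) (fun se =>
        (pvIntPair? se).elim (v, none) (fun ivs =>
          if ivs.2 < 8 then
            let p := if ivs.1 > ivs.2 then (ivs.2, ivs.1) else (ivs.1, ivs.2)
            -- for i in range(8): if i >= start and i <= end: mask_val += 1 << i
            -- (i is nonnegative here, so i.toNat is exact for Python's 1 << i)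
            (ab.1, some ((PySem.List.pyRange 0 8 1).foldl
              (fun m i => if p.1 ≤ i ∧ i ≤ p.2 then m + ((1 : Int) <<< i.toNat) else m) 0))
          else (v, none))))      -- AssertionError / ValueError: excluded by Pre_

-- ===== PORT B =====
-- Source B works on the code points of v: v.find(sub) is PySem.Chars.find on v.toList; the
-- slices v[:dot], v[dot+1:], bits[:dash], bits[dash+1:] have a nonnegative bound in the
-- branches that take them (find returned ≠ -1 there), so they are exactly take/drop.
def bitrange_to_mask_alt (v : String) : String × Option Int :=
  let s := v.toList
  let dot := PySem.Chars.find s ['.']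
  if dot = -1 then (v, none)
  else
    let addr := String.ofList (s.take dot.toNat)
    let bits := s.drop (dot.toNat + 1)
    let dash := PySem.Chars.find bits ['-']
    -- start/end from int(); none = ValueError, excluded by Pre_
    let se? : Option (Int × Int) :=
      if dash = -1 then (PySem.Int.ofChars? bits).map (fun n => (n, n))
      else match PySem.Int.ofChars? (bits.take dash.toNat),
                 PySem.Int.ofChars? (bits.drop (dash.toNat + 1)) with
           | some a, some b => some (a, b)
           | _, _ => none
    match se? with
    | none => (v, none)
    | some (st, en) =>
      if en < 8 then      -- assert end < 8; failure excluded by Pre_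
        let lo := min st en
        let hi := min (max st en) 7
        -- (1 << (hi + 1)) - (1 << lo); lo and hi + 1 are nonnegative here, toNat is exact
        (addr, some ((1 : Int) <<< (hi + 1).toNat - (1 : Int) <<< lo.toNat))
      else (v, none)

-- ===== PRECONDITION & SPEC =====
-- Pre_ admits exactly the inputs on which A returns: either no '.' in v, or v contains
-- exactly one '.' (none after the first — A's 2-way unpack of v.split('.')), the bitrange
-- piece contains at most one '-' and yields int()-parseable bound strings (around the '-',
-- or the whole piece when there is none), and the end bound is < 8 (A's assert).
-- 0 ≤ start/end is stated explicitly but excludes nothing: a parsed bound string never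
-- contains '-', so int() can only return a nonnegative value there.
def preCheck_bitrange_to_mask (v : String) : Bool :=
  let s := v.toList
  let dot := PySem.Chars.find s ['.']
  if dot = -1 then true
  else
    let bits := s.drop (dot.toNat + 1)
    decide (PySem.Chars.find bits ['.'] = -1) &&
    (let dash := PySem.Chars.find bits ['-']
     let se? : Option (Int × Int) :=
       if dash = -1 then (PySem.Int.ofChars? bits).map (fun n => (n, n))
       else if PySem.Chars.find (bits.drop (dash.toNat + 1)) ['-'] = -1 then
         match PySem.Int.ofChars? (bits.take dash.toNat),
               PySem.Int.ofChars? (bits.drop (dash.toNat + 1)) with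
         | some a, some b => some (a, b)
         | _, _ => none
       else none
     match se? with
     | some (a, b) => decide (0 ≤ a ∧ 0 ≤ b ∧ b < 8)
     | none => false)

def Pre_bitrange_to_mask (v : String) : Prop := preCheck_bitrange_to_mask v = true
instance (v : String) : Decidable (Pre_bitrange_to_mask v) := by
  unfold Pre_bitrange_to_mask; infer_instance

def pvWitness_bitrange_to_mask : String := "$d020.3-5"

def Spec_bitrange_to_mask (v : String) (out : String × Option Int) : Prop := out = bitrange_to_mask_alt v
instance (v : String) (out : String × Option Int) : Decidable (Spec_bitrange_to_mask v out) := by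
  unfold Spec_bitrange_to_mask; infer_instance

-- ===== CLAIM (what is proved, stated in full; the proofs are below) =====
def Claim_equal_bitrange_to_mask : Prop := ∀ (v : String), Dom_bitrange_to_mask v → Pre_bitrange_to_mask v → Spec_bitrange_to_mask v (bitrange_to_mask v)

-- ===== LEMMAS AND PROOFS =====

-- splitting a list at the (unique) occurrence of a separator character:
-- PySem.Chars.splitOn.go scans past characters that are not the separator …
theorem pv_go_split_no_sep (c : Char) (fuel : Nat) (l cur : List Char) (acc : List (List Char))
    (h : c ∉ l) :
    PySem.Chars.splitOn.go [c] fuel l cur acc = acc.reverse ++ [cur.reverse ++ l] := by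
  induction fuel generalizing l cur with
  | zero => simp [PySem.Chars.splitOn.go]
  | succ fuel ih =>
    cases l with
    | nil => simp [PySem.Chars.splitOn.go]
    | cons d rest =>
      have hdc : c ≠ d := fun h' => h (h' ▸ List.mem_cons_self)
      rw [show PySem.Chars.splitOn.go [c] (fuel+1) (d :: rest) cur acc =
            PySem.Chars.splitOn.go [c] fuel rest (d :: cur) acc by
          simp [PySem.Chars.splitOn.go, List.isPrefixOf, hdc]]
      rw [ih rest (d :: cur) (fun h' => h (List.mem_cons_of_mem _ h'))]
      simp

-- … and cuts at the separator, flushing the piece read so far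
theorem pv_go_split_sep (c : Char) (b : List Char) (fuel : Nat) (a cur : List Char)
    (acc : List (List Char)) (h : c ∉ a) :
    PySem.Chars.splitOn.go [c] (fuel + a.length + 1) (a ++ c :: b) cur acc =
      PySem.Chars.splitOn.go [c] fuel b [] ((cur.reverse ++ a) :: acc) := by
  induction a generalizing cur with
  | nil => simp [PySem.Chars.splitOn.go, List.isPrefixOf]
  | cons d rest ih =>
    have hdc : c ≠ d := fun h' => h (h' ▸ List.mem_cons_self)
    have hfl : fuel + (d :: rest).length + 1 = (fuel + rest.length + 1) + 1 := by
      simp; omega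
    rw [hfl]
    rw [show PySem.Chars.splitOn.go [c] ((fuel + rest.length + 1)+1) ((d :: rest) ++ c :: b) cur acc =
          PySem.Chars.splitOn.go [c] (fuel + rest.length + 1) (rest ++ c :: b) (d :: cur) acc by
        simp [PySem.Chars.splitOn.go, List.isPrefixOf, hdc]]
    rw [ih (d :: cur) (fun h' => h (List.mem_cons_of_mem _ h'))]
    simp

-- s.split(c) on a string with exactly one occurrence of c is the two surrounding pieces
theorem pv_splitOn_two (c : Char) (a b : List Char) (ha : c ∉ a) (hb : c ∉ b) :
    PySem.Chars.splitOn (a ++ c :: b) [c] = [a, b] := by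
  unfold PySem.Chars.splitOn
  have hl : (a ++ c :: b).length + 1 = (b.length + 1) + a.length + 1 := by simp; omega
  rw [hl, pv_go_split_sep c b (b.length + 1) a [] [] ha]
  simp only [List.reverse_nil, List.nil_append]
  rw [pv_go_split_no_sep c (b.length + 1) b [] [a] hb]
  simp

-- s.find(c) on such a string is the length of the piece before c
theorem pv_find_go_sep (c : Char) (b : List Char) (a : List Char) (k : Nat) (h : c ∉ a) :
    PySem.Chars.find.go [c] (a ++ c :: b) k = (k : Int) + a.length := by
  induction a generalizing k with
  | nil => simp [PySem.Chars.find.go, List.isPrefixOf]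
  | cons d rest ih =>
    have hdc : c ≠ d := fun h' => h (h' ▸ List.mem_cons_self)
    rw [show PySem.Chars.find.go [c] ((d :: rest) ++ c :: b) k =
          PySem.Chars.find.go [c] (rest ++ c :: b) (k+1) by
        simp [PySem.Chars.find.go, List.isPrefixOf, hdc]]
    rw [ih (k+1) (fun h' => h (List.mem_cons_of_mem _ h'))]
    push_cast; simp; omega

theorem pv_find_sep (c : Char) (a b : List Char) (h : c ∉ a) :
    PySem.Chars.find (a ++ c :: b) [c] = a.length := by
  unfold PySem.Chars.find
  rw [pv_find_go_sep c b a 0 h]; simp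

-- a list containing c splits at the FIRST occurrence of c
theorem pv_first_split (c : Char) (s : List Char) (h : c ∈ s) :
    ∃ a b, s = a ++ c :: b ∧ c ∉ a := by
  induction s with
  | nil => cases h
  | cons d u ih =>
    by_cases hd : d = c
    · exact ⟨[], u, by simp [hd], by simp⟩
    · rcases List.mem_cons.mp h with h' | h'
      · exact absurd h'.symm hd
      · obtain ⟨a, b, rfl, ha⟩ := ih h'
        exact ⟨d :: a, b, rfl, by simp [ha, Ne.symm hd]⟩

theorem pv_find_eq_neg_one_iff_not_mem (c : Char) (s : List Char) :
    PySem.Chars.find s [c] = -1 ↔ c ∉ s := by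
  rw [PySem.Chars.find_eq_neg_one_iff, List.singleton_infix_iff]

-- A's bit loop equals B's closed form, for 0 ≤ s ≤ e with s ≤ 7.
theorem pv_mask_loop_eq_closed (s e : Int) (hs0 : 0 ≤ s) (hse : s ≤ e) (hs7 : s ≤ 7) :
    (PySem.List.pyRange 0 8 1).foldl
      (fun m i => if s ≤ i ∧ i ≤ e then m + ((1 : Int) <<< i.toNat) else m) 0
    = ((1 : Int) <<< (min e 7 + 1).toNat) - ((1 : Int) <<< s.toNat) := by
  rw [PySem.List.foldl_congr_mem (g := fun m i =>
        if s ≤ i ∧ i ≤ min e 7 then m + ((1 : Int) <<< i.toNat) else m)]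
  · have hsm : s ≤ min e 7 := le_min hse hs7
    have hm7 : min e 7 ≤ 7 := min_le_right _ _
    generalize min e 7 = m at hsm hm7 ⊢
    interval_cases s <;> interval_cases m <;> decide
  · intro acc x hx
    have := (PySem.List.mem_pyRange_one.mp hx)
    have hx7 : x ≤ 7 := by omega
    by_cases h : s ≤ x ∧ x ≤ e
    · rw [if_pos h, if_pos ⟨h.1, le_min h.2 hx7⟩]
    · rw [if_neg h, if_neg (by intro ⟨h1, h2⟩; exact h ⟨h1, le_trans h2 (min_le_left _ _)⟩)]

-- Str.split? at a unique separator occurrence, on the String side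
theorem pv_str_split_two (y : String) (c : Char) (a b : List Char)
    (hy : y.toList = a ++ c :: b) (ha : c ∉ a) (hb : c ∉ b) :
    PySem.Str.split? y (String.ofList [c]) = some [String.ofList a, String.ofList b] := by
  have h := PySem.Str.split?_map y (String.ofList [c])
  rw [String.toList_ofList] at h
  rw [hy] at h
  rw [show PySem.Chars.split? (a ++ c :: b) [c] = some [a, b] by
        simp [PySem.Chars.split?, pv_splitOn_two c a b ha hb]] at h
  cases hsp : PySem.Str.split? y (String.ofList [c]) with
  | none => rw [hsp] at h; simp at h
  | some parts =>
    rw [hsp] at h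
    simp only [Option.map_some, Option.some.injEq] at h
    have hp : parts = [String.ofList a, String.ofList b] := by
      have h' := congrArg (List.map String.ofList) h
      simpa [List.map_map, Function.comp_def, String.ofList_toList] using h'
    rw [hp]

-- the two int() arguments agree: Int.ofStr? reads the code points
theorem pv_ofStr_ofList (a : List Char) :
    PySem.Int.ofStr? (String.ofList a) = PySem.Int.ofChars? a := by
  simp [PySem.Int.ofStr?]

-- ===== VERDICT (by name: the statement is the Claim_ definition above) =====
theorem bitrange_to_mask_spec : Claim_equal_bitrange_to_mask := by
  intro v _ hpre
  unfold Spec_bitrange_to_mask bitrange_to_mask bitrange_to_mask_alt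
  unfold Pre_bitrange_to_mask preCheck_bitrange_to_mask at hpre
  by_cases hc : '.' ∈ v.toList
  · -- v = a ++ '.' :: b at the first '.'
    obtain ⟨a, b, hv, ha⟩ := pv_first_split '.' v.toList hc
    have hfind : PySem.Chars.find v.toList ['.'] = (a.length : Int) := by
      rw [hv]; exact pv_find_sep '.' a b ha
    have hne : ¬((a.length : Int) = -1) := by omega
    have htn : ((a.length : Int)).toNat = a.length := by simp
    have hbits : v.toList.drop (a.length + 1) = b := by
      rw [hv]; simp [List.drop_append]
    have htake : v.toList.take a.length = a := by rw [hv]; exact List.take_left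
    simp only [hfind] at hpre
    simp only [if_neg hne, htn, hbits, Bool.and_eq_true, decide_eq_true_eq] at hpre
    obtain ⟨hnodot, hpre⟩ := hpre
    have hb : '.' ∉ b := (pv_find_eq_neg_one_iff_not_mem '.' b).mp hnodot
    have hisin : PySem.Str.isIn "." v = true := by
      rw [PySem.Str.isIn_iff_infix]
      exact (List.singleton_infix_iff '.' v.toList).mpr hc
    have hsplit : PySem.Str.split? v "." = some [String.ofList a, String.ofList b] := by
      rw [show ("." : String) = String.ofList ['.'] from rfl]
      exact pv_str_split_two v '.' a b hv ha hb
    -- reduce both sides to the decomposition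
    simp only [hfind, if_neg hne, htn, hbits, htake, hisin, hsplit, pvSplit2?, Option.elim_some]
    by_cases hd : '-' ∈ b
    · -- bitrange 'start-end': b = p ++ '-' :: q at the first '-'
      obtain ⟨p, q, hbpq, hp⟩ := pv_first_split '-' b hd
      have hfind2 : PySem.Chars.find b ['-'] = (p.length : Int) := by
        rw [hbpq]; exact pv_find_sep '-' p q hp
      have hne2 : ¬((p.length : Int) = -1) := by omega
      have htn2 : ((p.length : Int)).toNat = p.length := by simp
      have hq' : b.drop (p.length + 1) = q := by rw [hbpq]; simp [List.drop_append]
      have htake2 : b.take p.length = p := by rw [hbpq]; exact List.take_left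
      simp only [hfind2] at hpre
      simp only [if_neg hne2, htn2, hq', htake2] at hpre
      by_cases hqq : PySem.Chars.find q ['-'] = -1
      · have hq : '-' ∉ q := (pv_find_eq_neg_one_iff_not_mem '-' q).mp hqq
        simp only [if_pos hqq] at hpre
        cases hst : PySem.Int.ofChars? p with
        | none => rw [hst] at hpre; simp at hpre
        | some st =>
          cases hen : PySem.Int.ofChars? q with
          | none => rw [hst, hen] at hpre; simp at hpre
          | some en =>
            rw [hst, hen] at hpre
            simp only [decide_eq_true_eq] at hpre
            obtain ⟨hst0, hen0, hen8⟩ := hpre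
            have hisin2 : PySem.Str.isIn "-" (String.ofList b) = true := by
              rw [PySem.Str.isIn_iff_infix, String.toList_ofList]
              exact (List.singleton_infix_iff '-' (String.ofList b).toList).mpr (by simpa using hd)
            have hsplit2 : PySem.Str.split? (String.ofList b) "-" =
                some [String.ofList p, String.ofList q] := by
              rw [show ("-" : String) = String.ofList ['-'] from rfl]
              exact pv_str_split_two (String.ofList b) '-' p q (by rw [String.toList_ofList]; exact hbpq) hp hq
            simp only [hisin2, if_true, hsplit2, Option.elim_some, pvIntPair?,
              pv_ofStr_ofList, hst, hen, hfind2, if_neg hne2, htn2, hq', htake2,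
              Option.elim_some, if_pos hen8, not_true, if_false]
            simp only [Prod.mk.injEq, Option.some.injEq, true_and]
            by_cases hgt : st > en
            · rw [if_pos hgt,
                  pv_mask_loop_eq_closed en st hen0 (le_of_lt hgt) (by omega),
                  min_eq_right (le_of_lt hgt), max_eq_left (le_of_lt hgt)]
            · rw [if_neg hgt]
              rw [not_lt] at hgt
              rw [pv_mask_loop_eq_closed st en hst0 hgt (by omega),
                  min_eq_left hgt, max_eq_right hgt]
      · rw [if_neg hqq] at hpre; simp at hpre
    · -- single bound: start = end = int(b)
      have hfind2 : PySem.Chars.find b ['-'] = -1 :=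
        (pv_find_eq_neg_one_iff_not_mem '-' b).mpr hd
      simp only [hfind2, if_true] at hpre
      cases hn : PySem.Int.ofChars? b with
      | none => rw [hn] at hpre; simp at hpre
      | some n =>
        rw [hn] at hpre
        simp only [Option.map_some, decide_eq_true_eq] at hpre
        obtain ⟨hn0, -, hn8⟩ := hpre
        have hisin2 : PySem.Str.isIn "-" (String.ofList b) = false := by
          rw [← Bool.not_eq_true, PySem.Str.isIn_iff_infix, String.toList_ofList]
          simpa [List.singleton_infix_iff] using hd
        simp only [hisin2, Bool.false_eq_true, if_false, Option.elim_some,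
          pvIntPair?, pv_ofStr_ofList, hn, hfind2, Option.map_some, Option.elim_some]
        simp only [if_true, if_pos hn8, gt_iff_lt, lt_irrefl, if_false, not_true, Prod.mk.injEq,
          Option.some.injEq, true_and]
        rw [pv_mask_loop_eq_closed n n hn0 le_rfl (by omega), min_self, max_self]
  · -- no '.' in v: both sides return (v, none)
    have hfind : PySem.Chars.find v.toList ['.'] = -1 :=
      (pv_find_eq_neg_one_iff_not_mem '.' v.toList).mpr hc
    have hisin : PySem.Chars.isIn ['.'] v.toList = false := by
      rw [PySem.Chars.isIn_eq_false_iff, List.singleton_infix_iff]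
      exact hc
    simp [hfind, hisin]
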